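-- pv_equiv track=rewrite | github.com/JesseSmitsKUL/Thesis_code | util/streamEvaluations.py | streamTrends
-- ===== SOURCE A (Python) =====
-- def streamTrends(stream):
--     alternating = 0
--     followingTrend = 0
--     direction = 'up' if stream[0] < stream[1] else 'down'
--     last = stream[1]
--     for packet in stream[2:]:
--         newDirection =  'up' if last < packet else 'down'
--         if newDirection == direction:
--             followingTrend += 1
--         else:
--             alternating += 1
--         direction = newDirection
--         last = packet
--     return (alternating,followingTrend)
-- ===== SOURCE B (Python) =====
-- def streamTrends(stream):
--     # Run-length view: split the direction sequence into maximal monotone runs;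
--     # alternations are run boundaries, continuations are within-run adjacencies.
--     runs = []            # lengths of maximal runs of equal direction
--     prev = None
--     for a, b in zip(stream, stream[1:]):
--         d = a < b
--         if d == prev:
--             runs[-1] += 1
--         else:
--             runs.append(1)
--         prev = d
--     return (len(runs) - 1, sum(runs) - len(runs))
-- ===== Notes on version B (the rewrite author's own statement) =====
-- stated objective: alternative
-- what changed: Replaces A's fused stateful scan (carrying direction/last and classifying each step) with a run-length decomposition: build the list of maximal monotone run lengths, then read off alternations as run boundaries (len(runs)-1) and continuations as within-run adjacencies (sum(runs)-len(runs)).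
import Mathlib
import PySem

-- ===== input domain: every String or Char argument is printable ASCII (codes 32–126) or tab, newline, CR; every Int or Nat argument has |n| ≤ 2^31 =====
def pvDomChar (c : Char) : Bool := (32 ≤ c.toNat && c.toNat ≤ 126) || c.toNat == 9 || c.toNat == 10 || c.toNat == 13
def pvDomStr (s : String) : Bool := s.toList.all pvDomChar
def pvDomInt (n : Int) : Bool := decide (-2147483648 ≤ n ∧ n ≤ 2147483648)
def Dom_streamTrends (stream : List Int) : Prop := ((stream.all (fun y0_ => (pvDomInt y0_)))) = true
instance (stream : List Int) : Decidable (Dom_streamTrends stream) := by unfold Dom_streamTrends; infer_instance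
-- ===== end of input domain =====

-- B replaces A's fused stateful scan with a run-length decomposition of the direction
-- sequence (alternative decomposition; same cost).

-- ===== PORT A =====
-- A's fused loop: state = (alternating, followingTrend, direction, last); 'up' encoded as true.
def streamTrendsLoop : List Int → Int × Int → Bool → Int → Int × Int
  | [], acc, _, _ => acc
  | packet :: rest, (alternating, followingTrend), direction, last =>
      let newDirection := decide (last < packet)
      if newDirection == direction then
        streamTrendsLoop rest (alternating, followingTrend + 1) newDirection packet
      else
        streamTrendsLoop rest (alternating + 1, followingTrend) newDirection packet

def streamTrends (stream : List Int) : Int × Int :=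
  match stream with
  | s0 :: s1 :: rest => streamTrendsLoop rest (0, 0) (decide (s0 < s1)) s1
  | _ => (0, 0)  -- Python A raises IndexError here; excluded by Pre_streamTrends

-- ===== PORT B =====
-- Source B's `runs[-1] += 1`: increment the last element of the list.
def pvBumpLast : List Int → List Int
  | [] => []
  | [x] => [x + 1]
  | x :: y :: xs => x :: pvBumpLast (y :: xs)

-- Source B's loop body over the zipped adjacent pairs; state = (runs, prev).
def pvRunsStep (st : List Int × Option Bool) (p : Int × Int) : List Int × Option Bool :=
  let d := decide (p.1 < p.2)
  ((if (some d == st.2) then pvBumpLast st.1 else st.1 ++ [1]), some d)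

def streamTrends_alt (stream : List Int) : Int × Int :=
  let runs := ((stream.zip stream.tail).foldl pvRunsStep ([], none)).1
  ((runs.length : Int) - 1, runs.sum - (runs.length : Int))

-- ===== PRECONDITION & SPEC =====
-- Pre_ excludes exactly the inputs (length < 2) on which the Python A raises IndexError reading the first two elements.
def Pre_streamTrends (stream : List Int) : Prop := 2 ≤ stream.length
instance (stream : List Int) : Decidable (Pre_streamTrends stream) := by unfold Pre_streamTrends; infer_instance
def pvWitness_streamTrends : List Int := [1, 3, 2]

def Spec_streamTrends (stream : List Int) (out : Int × Int) : Prop := out = streamTrends_alt stream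
instance (stream : List Int) (out : Int × Int) : Decidable (Spec_streamTrends stream out) := by unfold Spec_streamTrends; infer_instance

-- ===== CLAIM (what is proved, stated in full; the proofs are below) =====
def Claim_equal_streamTrends : Prop := ∀ (stream : List Int), Dom_streamTrends stream → Pre_streamTrends stream → Spec_streamTrends stream (streamTrends stream)

-- ===== LEMMAS AND PROOFS =====

-- the direction sequence of a stream
def pvDirs (l : List Int) : List Bool := (l.zip l.tail).map (fun p => decide (p.1 < p.2))

-- number of adjacent EQUAL direction pairs starting from direction d (A's followingTrend)
def pvSame : Bool → List Bool → Int
  | _, [] => 0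
  | d, x :: xs => (if x == d then 1 else 0) + pvSame x xs

-- number of adjacent UNEQUAL direction pairs starting from direction d (A's alternating)
def pvFlips : Bool → List Bool → Int
  | _, [] => 0
  | d, x :: xs => (if x == d then 0 else 1) + pvFlips x xs

lemma pvSame_add_pvFlips (xs : List Bool) : ∀ d, pvSame d xs + pvFlips d xs = (xs.length : Int) := by
  induction xs with
  | nil => intro d; simp [pvSame, pvFlips]
  | cons x xs ih =>
    intro d
    have h2 := ih x
    simp only [pvSame, pvFlips, List.length_cons]
    by_cases h : x = d
    · subst h; simp only [beq_self_eq_true, if_true]; push_cast; omega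
    · have hb : (x == d) = false := by simp [h]
      simp only [hb, Bool.false_eq_true, if_false]; push_cast; omega

-- A's loop computes (alt + pvFlips, fol + pvSame) over the remaining directions.
lemma streamTrendsLoop_eq (l : List Int) :
    ∀ (d : Bool) (last alternating followingTrend : Int),
    streamTrendsLoop l (alternating, followingTrend) d last =
      (alternating + pvFlips d (pvDirs (last :: l)),
       followingTrend + pvSame d (pvDirs (last :: l))) := by
  induction l with
  | nil => intro d last a f; simp [streamTrendsLoop, pvDirs, pvSame, pvFlips]
  | cons p rest ih =>
    intro d last a f
    have hd : pvDirs (last :: p :: rest) = decide (last < p) :: pvDirs (p :: rest) := by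
      simp [pvDirs]
    rw [streamTrendsLoop]
    simp only [hd, pvSame, pvFlips]
    by_cases h : decide (last < p) = d
    · simp only [h, beq_self_eq_true, if_true, ih, Prod.mk.injEq]
      constructor <;> ring
    · have hb : (decide (last < p) == d) = false := by simp [h]
      simp only [hb, Bool.false_eq_true, if_false, ih, Prod.mk.injEq]
      constructor <;> ring

lemma pvBumpLast_sum (xs : List Int) (h : xs ≠ []) : (pvBumpLast xs).sum = xs.sum + 1 := by
  induction xs with
  | nil => exact absurd rfl h
  | cons x xs ih =>
    cases xs with
    | nil => simp [pvBumpLast]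
    | cons y ys => simp only [pvBumpLast, List.sum_cons, ih (by simp)]; ring

lemma pvBumpLast_length (xs : List Int) : (pvBumpLast xs).length = xs.length := by
  induction xs with
  | nil => rfl
  | cons x xs ih =>
    cases xs with
    | nil => rfl
    | cons y ys => simp only [pvBumpLast, List.length_cons] at *; omega

lemma pvBumpLast_ne_nil (xs : List Int) (h : xs ≠ []) : pvBumpLast xs ≠ [] := by
  cases xs with
  | nil => exact absurd rfl h
  | cons x xs => cases xs <;> simp [pvBumpLast]

-- B's fold over the direction sequence: sums and lengths of the run list.
def pvStep' (st : List Int × Option Bool) (d : Bool) : List Int × Option Bool :=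
  ((if (some d == st.2) then pvBumpLast st.1 else st.1 ++ [1]), some d)

lemma fold_runs (xs : List Bool) :
    ∀ (p : Bool) (runs : List Int), runs ≠ [] →
    let r := (xs.foldl pvStep' (runs, some p)).1
    r ≠ [] ∧ r.sum = runs.sum + (xs.length : Int) ∧
      (r.length : Int) = (runs.length : Int) + pvFlips p xs := by
  induction xs with
  | nil => intro p runs h; exact ⟨h, by simp, by simp [pvFlips]⟩
  | cons x xs ih =>
    intro p runs h
    simp only [List.foldl_cons, pvStep', pvFlips, List.length_cons]
    by_cases hx : x = p
    · simp only [hx, beq_self_eq_true, if_true]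
      obtain ⟨h1, h2, h3⟩ := ih p (pvBumpLast runs) (pvBumpLast_ne_nil runs h)
      refine ⟨h1, ?_, ?_⟩
      · rw [h2, pvBumpLast_sum runs h]; push_cast; ring
      · rw [h3, pvBumpLast_length]; ring
    · have hb : ((some x == some p)) = false := by simp [hx]
      simp only [hb, Bool.false_eq_true, if_false]
      obtain ⟨h1, h2, h3⟩ := ih x (runs ++ [1]) (by simp)
      refine ⟨h1, ?_, ?_⟩
      · rw [h2]; simp; ring
      · have hb2 : (x == p) = false := by simp [hx]
        rw [h3]; simp [hb2]; ring

-- B's fold over zipped pairs is the fold of pvStep' over the direction sequence.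
lemma foldl_pairs_eq_dirs (stream : List Int) (init : List Int × Option Bool) :
    (stream.zip stream.tail).foldl pvRunsStep init = (pvDirs stream).foldl pvStep' init := by
  rw [pvDirs, List.foldl_map]
  rfl

theorem streamTrends_spec : Claim_equal_streamTrends := by
  intro stream _ hpre
  match stream with
  | [] => simp [Pre_streamTrends] at hpre
  | [_] => simp [Pre_streamTrends] at hpre
  | s0 :: s1 :: rest =>
    show streamTrendsLoop rest (0, 0) (decide (s0 < s1)) s1 = streamTrends_alt (s0 :: s1 :: rest)
    rw [streamTrendsLoop_eq]
    unfold streamTrends_alt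
    rw [foldl_pairs_eq_dirs]
    have hd : pvDirs (s0 :: s1 :: rest) = decide (s0 < s1) :: pvDirs (s1 :: rest) := by
      simp [pvDirs]
    rw [hd]
    simp only [List.foldl_cons, pvStep']
    have hfirst : pvStep' ([], none) (decide (s0 < s1)) = ([1], some (decide (s0 < s1))) := by
      simp [pvStep']
    obtain ⟨h1, h2, h3⟩ := fold_runs (pvDirs (s1 :: rest)) (decide (s0 < s1)) [1] (by simp)
    simp only [show ((some (decide (s0 < s1)) == (none : Option Bool))) = false from rfl,
      Bool.false_eq_true, if_false, List.nil_append]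
    rw [h2, h3]
    have hsf := pvSame_add_pvFlips (pvDirs (s1 :: rest)) (decide (s0 < s1))
    simp only [List.sum_cons, List.sum_nil, List.length_cons, List.length_nil, Prod.mk.injEq]
    push_cast
    constructor <;> omega
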